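-- pv_equiv track=rewrite | github.com/itamar-sh/NLP-Course | Hidden Markov Models POS tagger.py | get_tag_dict
-- ===== SOURCE A (Python) =====
-- from collections import defaultdict
--
-- def get_tag_dict(train):
--     big_dict = dict()
--     for sent in train:
--         for word, tag in sent:
--             if word not in big_dict:
--                 big_dict[word] = defaultdict(int)
--             big_dict[word][tag] += 1
--     return big_dict
-- ===== SOURCE B (Python) =====
-- from collections import defaultdict, Counter
--
-- def get_tag_dict(train):
--     # one flat Counter over all (word, tag) pairs, then redistribute into the nested dict
--     counts = Counter((w, t) for sent in train for w, t in sent)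
--     big_dict = dict()
--     for (w, t), c in counts.items():
--         big_dict.setdefault(w, defaultdict(int))[t] = c
--     return big_dict
-- ===== Notes on version B (the rewrite author's own statement) =====
-- stated objective: alternative
-- what changed: Instead of A's single scan that increments nested dict counters in place, B first builds one flat Counter over all (word, tag) pairs and then redistributes the finished counts into the nested dict in a second pass over the Counter's items.
import Mathlib
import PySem

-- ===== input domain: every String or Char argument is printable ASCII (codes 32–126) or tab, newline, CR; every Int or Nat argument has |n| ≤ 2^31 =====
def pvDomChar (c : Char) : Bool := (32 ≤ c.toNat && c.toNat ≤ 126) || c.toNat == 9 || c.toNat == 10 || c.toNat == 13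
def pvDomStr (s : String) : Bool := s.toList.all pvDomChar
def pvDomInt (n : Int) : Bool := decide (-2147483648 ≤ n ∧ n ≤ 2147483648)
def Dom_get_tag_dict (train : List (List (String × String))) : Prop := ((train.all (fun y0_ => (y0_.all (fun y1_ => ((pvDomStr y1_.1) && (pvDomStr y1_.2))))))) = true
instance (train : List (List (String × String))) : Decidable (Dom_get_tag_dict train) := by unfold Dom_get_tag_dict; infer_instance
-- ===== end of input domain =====

-- B replaces A's single incrementing scan over a nested dict by a flat Counter over all
-- (word, tag) pairs followed by a second redistribution pass (objective: alternative decomposition).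

-- ===== PORT A =====
def get_tag_dict (train : List (List (String × String))) : List (String × List (String × Int)) :=
  (train.foldl
      (fun d sent =>
        sent.foldl
          (fun d wt =>
            let d1 := if d.contains wt.1 then d else d.insert wt.1 PySem.Dict.empty
            d1.insert wt.1 ((d1.getD wt.1 PySem.Dict.empty).modify wt.2 0 (· + 1)))
          d)
      (PySem.Dict.empty : PySem.Dict String (PySem.Dict String Int))).items.map
    (fun p => (p.1, p.2.items))

-- ===== PORT B =====
def get_tag_dict_alt (train : List (List (String × String))) : List (String × List (String × Int)) :=
  let counts : PySem.Dict (String × String) Int := PySem.Dict.counter (train.flatMap (fun s => s))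
  (counts.items.foldl
      (fun d q =>
        let d2 := d.setdefault q.1.1 PySem.Dict.empty
        d2.insert q.1.1 ((d2.getD q.1.1 PySem.Dict.empty).insert q.1.2 q.2))
      (PySem.Dict.empty : PySem.Dict String (PySem.Dict String Int))).items.map
    (fun p => (p.1, p.2.items))

-- ===== PRECONDITION & SPEC =====
def Spec_get_tag_dict (train : List (List (String × String))) (out : List (String × List (String × Int))) : Prop := out = get_tag_dict_alt train
instance (train : List (List (String × String))) (out : List (String × List (String × Int))) : Decidable (Spec_get_tag_dict train out) := by unfold Spec_get_tag_dict; infer_instance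

-- ===== CLAIM (what is proved, stated in full; the proofs are below) =====
def Claim_equal_get_tag_dict : Prop := ∀ (train : List (List (String × String))), Dom_get_tag_dict train → Spec_get_tag_dict train (get_tag_dict train)

-- ===== LEMMAS AND PROOFS =====

-- A's loop body and B's loop body, named for the proofs (definitionally the ports' lambdas)
def pvStepA (d : PySem.Dict String (PySem.Dict String Int)) (wt : String × String) :
    PySem.Dict String (PySem.Dict String Int) :=
  let d1 := if d.contains wt.1 then d else d.insert wt.1 PySem.Dict.empty
  d1.insert wt.1 ((d1.getD wt.1 PySem.Dict.empty).modify wt.2 0 (· + 1))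

def pvStepB (d : PySem.Dict String (PySem.Dict String Int)) (q : (String × String) × Int) :
    PySem.Dict String (PySem.Dict String Int) :=
  let d2 := d.setdefault q.1.1 PySem.Dict.empty
  d2.insert q.1.1 ((d2.getD q.1.1 PySem.Dict.empty).insert q.1.2 q.2)

-- canonical form of the grouped dict
def pvTags (ps : List (String × String)) (w : String) : List String :=
  PySem.Set.ofList ((ps.filter (fun p => p.1 == w)).map (·.2))

def pvInner (ps : List (String × String)) (w : String) : PySem.Dict String Int :=
  PySem.Dict.mk ((pvTags ps w).map (fun t => (t, (ps.count (w, t) : Int))))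

def pvOuter (ps : List (String × String)) : PySem.Dict String (PySem.Dict String Int) :=
  PySem.Dict.mk ((PySem.Set.ofList (ps.map (·.1))).map (fun w => (w, pvInner ps w)))

lemma pv_mem_tags (ps : List (String × String)) (w t : String) :
    t ∈ pvTags ps w ↔ (w, t) ∈ ps := by
  unfold pvTags
  rw [PySem.Set.mem_ofList]
  simp only [List.mem_map, List.mem_filter, beq_iff_eq]
  constructor
  · rintro ⟨⟨a, b⟩, ⟨hm, he⟩, rfl⟩; simpa [← he] using hm
  · intro hm; exact ⟨(w, t), ⟨hm, rfl⟩, rfl⟩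

lemma pv_keys_inner (ps : List (String × String)) (w : String) :
    (pvInner ps w).keys = pvTags ps w := by
  simp [pvInner, PySem.Dict.keys, Function.comp_def]

lemma pv_inner_skip (ps : List (String × String)) (w t w' : String) (h : w' ≠ w) :
    pvInner (ps ++ [(w, t)]) w' = pvInner ps w' := by
  unfold pvInner
  have hfilt : (ps ++ [(w, t)]).filter (fun p => p.1 == w') = ps.filter (fun p => p.1 == w') := by
    rw [List.filter_append]; simp [Ne.symm h]
  unfold pvTags
  rw [hfilt]
  congr 1
  apply List.map_congr_left
  intro t' _
  have : List.count (w', t') [(w, t)] = 0 := by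
    rw [List.count_eq_zero]
    intro hc
    exact h (congrArg Prod.fst (List.mem_singleton.mp hc))
  rw [List.count_append, this, Nat.add_zero]

lemma pv_tags_step (ps : List (String × String)) (w t : String) :
    pvTags (ps ++ [(w, t)]) w = PySem.Set.add (pvTags ps w) t := by
  unfold pvTags
  rw [List.filter_append]
  simp only [List.filter_cons, List.filter_nil, beq_self_eq_true, if_pos]
  rw [List.map_append, List.map_singleton, PySem.Set.ofList_append_singleton]

lemma pv_inner_step (ps : List (String × String)) (w t : String) :
    pvInner (ps ++ [(w, t)]) w = (pvInner ps w).modify t 0 (· + 1) := by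
  have hmod : (pvInner ps w).modify t 0 (· + 1)
      = (pvInner ps w).insert t ((pvInner ps w).getD t 0 + 1) := rfl
  have hnd : (pvInner ps w).keys.Nodup := by
    rw [pv_keys_inner]; exact PySem.Set.nodup_ofList _
  by_cases hmem : t ∈ pvTags ps w
  · have hcnt : (t, (ps.count (w, t) : Int)) ∈ (pvInner ps w).items :=
      List.mem_map_of_mem hmem
    have hcon : (pvInner ps w).contains t = true := by
      rw [PySem.Dict.contains_eq_decide_mem_keys, pv_keys_inner]; simpa
    rw [hmod, PySem.Dict.getD_of_mem_items _ hcnt hnd 0]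
    apply PySem.Dict.ext
    rw [PySem.Dict.items_insert_of_contains _ _ hcon]
    show ((pvTags (ps ++ [(w, t)]) w).map (fun t' => (t', ((ps ++ [(w, t)]).count (w, t') : Int))))
      = ((pvTags ps w).map (fun t' => (t', (ps.count (w, t') : Int)))).map
          (fun p => if (p.1 == t) = true then (t, (ps.count (w, t) : Int) + 1) else p)
    rw [pv_tags_step, PySem.Set.add_of_mem hmem, List.map_map]
    apply List.map_congr_left
    intro t' _
    by_cases he : t' = t
    · subst he
      simp [List.count_append]
    · have : List.count (w, t') [(w, t)] = 0 := by
        rw [List.count_eq_zero]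
        intro hc
        exact he (congrArg Prod.snd (List.mem_singleton.mp hc))
      simp [Function.comp, he, List.count_append, this]
  · have hcon : (pvInner ps w).contains t = false := by
      rw [PySem.Dict.contains_eq_decide_mem_keys, pv_keys_inner]; simpa
    rw [hmod, PySem.Dict.getD_of_not_contains _ _ hcon]
    apply PySem.Dict.ext
    rw [PySem.Dict.items_insert_of_not_contains _ _ hcon]
    show ((pvTags (ps ++ [(w, t)]) w).map (fun t' => (t', ((ps ++ [(w, t)]).count (w, t') : Int))))
      = ((pvTags ps w).map (fun t' => (t', (ps.count (w, t') : Int)))) ++ [(t, 0 + 1)]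
    rw [pv_tags_step, PySem.Set.add_of_not_mem hmem, List.map_append, List.map_singleton]
    congr 1
    · apply List.map_congr_left
      intro t' ht'
      have hne : t' ≠ t := fun he => hmem (he ▸ ht')
      have : List.count (w, t') [(w, t)] = 0 := by
        rw [List.count_eq_zero]
        intro hc
        exact hne (congrArg Prod.snd (List.mem_singleton.mp hc))
      rw [List.count_append, this, Nat.add_zero]
    · have h0 : ps.count (w, t) = 0 :=
        List.count_eq_zero.mpr (fun hm => hmem ((pv_mem_tags ps w t).mpr hm))
      simp [List.count_append, h0]

lemma pv_keys_outer (ps : List (String × String)) :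
    (pvOuter ps).keys = PySem.Set.ofList (ps.map (·.1)) := by
  simp [pvOuter, PySem.Dict.keys, Function.comp_def]

lemma pv_nodup_outer (ps : List (String × String)) : (pvOuter ps).keys.Nodup := by
  rw [pv_keys_outer]; exact PySem.Set.nodup_ofList _

lemma pv_tags_skip (ps : List (String × String)) (a b w : String) (h : a ≠ w) :
    pvTags (ps ++ [(a, b)]) w = pvTags ps w := by
  unfold pvTags
  rw [List.filter_append]
  simp [h]

lemma pv_stepA_outer (ps : List (String × String)) (w t : String) :
    pvStepA (pvOuter ps) (w, t) = pvOuter (ps ++ [(w, t)]) := by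
  have houter : pvOuter (ps ++ [(w, t)])
      = PySem.Dict.mk ((PySem.Set.add (PySem.Set.ofList (ps.map (·.1))) w).map
          (fun w' => (w', pvInner (ps ++ [(w, t)]) w'))) := by
    unfold pvOuter
    rw [List.map_append, List.map_singleton, PySem.Set.ofList_append_singleton]
  by_cases hw : w ∈ PySem.Set.ofList (ps.map (·.1))
  · have hcon : (pvOuter ps).contains w = true := by
      rw [PySem.Dict.contains_eq_decide_mem_keys, pv_keys_outer]; exact decide_eq_true hw
    have hmemit : (w, pvInner ps w) ∈ (pvOuter ps).items := List.mem_map_of_mem hw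
    have hget : (pvOuter ps).getD w PySem.Dict.empty = pvInner ps w :=
      PySem.Dict.getD_of_mem_items _ hmemit (pv_nodup_outer ps) _
    show (if (pvOuter ps).contains w then pvOuter ps else (pvOuter ps).insert w PySem.Dict.empty).insert w
        (((if (pvOuter ps).contains w then pvOuter ps else (pvOuter ps).insert w PySem.Dict.empty).getD w
            PySem.Dict.empty).modify t 0 (· + 1))
      = pvOuter (ps ++ [(w, t)])
    rw [hcon, if_pos rfl, hget]
    apply PySem.Dict.ext
    rw [PySem.Dict.items_insert_of_contains _ _ hcon, houter, PySem.Set.add_of_mem hw]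
    show ((PySem.Set.ofList (ps.map (·.1))).map (fun w' => (w', pvInner ps w'))).map
        (fun p => if (p.1 == w) = true then (w, (pvInner ps w).modify t 0 (· + 1)) else p)
      = (PySem.Set.ofList (ps.map (·.1))).map (fun w' => (w', pvInner (ps ++ [(w, t)]) w'))
    rw [List.map_map]
    apply List.map_congr_left
    intro w' _
    by_cases he : w' = w
    · subst he
      simp [pv_inner_step]
    · simp [Function.comp, he, pv_inner_skip ps w t w' he]
  · have hcon : (pvOuter ps).contains w = false := by
      rw [PySem.Dict.contains_eq_decide_mem_keys, pv_keys_outer]; exact decide_eq_false hw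
    have htagsnil : pvTags ps w = [] := by
      unfold pvTags
      have : ps.filter (fun p => p.1 == w) = [] := by
        rw [List.filter_eq_nil_iff]
        intro p hp hbeq
        apply hw
        rw [PySem.Set.mem_ofList]
        exact List.mem_map.mpr ⟨p, hp, beq_iff_eq.mp hbeq⟩
      rw [this]; rfl
    have hinnernil : pvInner ps w = PySem.Dict.empty := by
      unfold pvInner; rw [htagsnil]; rfl
    show (if (pvOuter ps).contains w then pvOuter ps else (pvOuter ps).insert w PySem.Dict.empty).insert w
        (((if (pvOuter ps).contains w then pvOuter ps else (pvOuter ps).insert w PySem.Dict.empty).getD w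
            PySem.Dict.empty).modify t 0 (· + 1))
      = pvOuter (ps ++ [(w, t)])
    rw [hcon, if_neg (by simp)]
    have hcon1 : ((pvOuter ps).insert w PySem.Dict.empty).contains w = true :=
      PySem.Dict.contains_insert_self _ _ _
    apply PySem.Dict.ext
    rw [PySem.Dict.getD_insert_self, PySem.Dict.items_insert_of_contains _ _ hcon1,
        PySem.Dict.items_insert_of_not_contains _ _ hcon, houter, PySem.Set.add_of_not_mem hw,
        List.map_append, List.map_append, List.map_singleton, List.map_singleton]
    congr 1
    · show ((PySem.Set.ofList (ps.map (·.1))).map (fun w' => (w', pvInner ps w'))).map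
          (fun p => if (p.1 == w) = true then (w, (PySem.Dict.empty.modify t 0 (· + 1) :
            PySem.Dict String Int)) else p)
        = (PySem.Set.ofList (ps.map (·.1))).map (fun w' => (w', pvInner (ps ++ [(w, t)]) w'))
      rw [List.map_map]
      apply List.map_congr_left
      intro w' hw'
      have he : w' ≠ w := fun h => hw (h ▸ hw')
      simp [Function.comp, he, pv_inner_skip ps w t w' he]
    · rw [pv_inner_step ps w t, hinnernil]
      simp

def pvAsm (Q : List (String × String)) (f : String × String → Int) :
    PySem.Dict String (PySem.Dict String Int) :=
  PySem.Dict.mk ((PySem.Set.ofList (Q.map (·.1))).map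
    (fun w => (w, PySem.Dict.mk ((Q.filter (fun q => q.1 == w)).map (fun q => (q.2, f q))))))

lemma pv_keys_asm (Q : List (String × String)) (f : String × String → Int) :
    (pvAsm Q f).keys = PySem.Set.ofList (Q.map (·.1)) := by
  simp [pvAsm, PySem.Dict.keys, Function.comp_def]

lemma pv_foldB (Q : List (String × String)) (f : String × String → Int) (hQ : Q.Nodup) :
    (Q.map (fun q => (q, f q))).foldl pvStepB PySem.Dict.empty = pvAsm Q f := by
  induction Q using List.reverseRecOn with
  | nil => rfl
  | append_singleton Q q ih =>
      have hQ' : Q.Nodup := hQ.of_append_left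
      have hqQ : q ∉ Q := by
        rw [List.nodup_append] at hQ
        exact fun hm => hQ.2.2 q hm q (List.mem_singleton.mpr rfl) rfl
      obtain ⟨w, t⟩ := q
      rw [List.map_append, List.foldl_append, ih hQ', List.map_singleton, List.foldl_cons,
          List.foldl_nil]
      have hasm : pvAsm (Q ++ [(w, t)]) f
          = PySem.Dict.mk ((PySem.Set.add (PySem.Set.ofList (Q.map (·.1))) w).map
              (fun w' => (w', PySem.Dict.mk (((Q ++ [(w, t)]).filter (fun q => q.1 == w')).map
                (fun q => (q.2, f q)))))) := by
        unfold pvAsm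
        rw [List.map_append, List.map_singleton, PySem.Set.ofList_append_singleton]
      rw [show pvStepB (pvAsm Q f) ((w, t), f (w, t))
          = ((pvAsm Q f).setdefault w PySem.Dict.empty).insert w
              ((((pvAsm Q f).setdefault w PySem.Dict.empty).getD w PySem.Dict.empty).insert t
                (f (w, t))) from rfl]
      by_cases hw : w ∈ PySem.Set.ofList (Q.map (·.1))
      · have hcon : (pvAsm Q f).contains w = true := by
          rw [PySem.Dict.contains_eq_decide_mem_keys, pv_keys_asm]; exact decide_eq_true hw
        have hnd : (pvAsm Q f).keys.Nodup := by
          rw [pv_keys_asm]; exact PySem.Set.nodup_ofList _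
        have hmemit : (w, PySem.Dict.mk ((Q.filter (fun q => q.1 == w)).map (fun q => (q.2, f q))))
            ∈ (pvAsm Q f).items := List.mem_map_of_mem hw
        have hget : (pvAsm Q f).getD w PySem.Dict.empty
            = PySem.Dict.mk ((Q.filter (fun q => q.1 == w)).map (fun q => (q.2, f q))) :=
          PySem.Dict.getD_of_mem_items _ hmemit hnd _
        have hconI : (PySem.Dict.mk ((Q.filter (fun q => q.1 == w)).map
            (fun q => (q.2, f q)))).contains t = false := by
          rw [PySem.Dict.contains_eq_decide_mem_keys]
          apply decide_eq_false
          intro hmem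
          simp only [PySem.Dict.keys, List.map_map] at hmem
          obtain ⟨q', hq', he⟩ := List.mem_map.mp hmem
          have hq'w : q'.1 = w := beq_iff_eq.mp (List.mem_filter.mp hq').2
          have : (w, t) ∈ Q := by
            have := (List.mem_filter.mp hq').1
            rwa [show q' = (w, t) from Prod.ext hq'w he] at this
          exact hqQ this
        rw [PySem.Dict.setdefault_of_contains _ _ hcon, hget]
        apply PySem.Dict.ext
        rw [PySem.Dict.items_insert_of_contains _ _ hcon, hasm, PySem.Set.add_of_mem hw]
        simp only [pvAsm]
        rw [List.map_map]
        apply List.map_congr_left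
        intro w' hw'
        by_cases he : w' = w
        · subst he
          simp only [Function.comp_apply, beq_self_eq_true, if_true]
          refine congrArg (fun I => (w', I)) ?_
          apply PySem.Dict.ext
          rw [PySem.Dict.items_insert_of_not_contains _ _ hconI]
          show (Q.filter (fun q => q.1 == w')).map (fun q => (q.2, f q)) ++ [(t, f (w', t))]
            = ((Q ++ [(w', t)]).filter (fun q => q.1 == w')).map (fun q => (q.2, f q))
          rw [List.filter_append, List.filter_cons, List.filter_nil]
          simp
        · have hne : ((w', PySem.Dict.mk ((Q.filter (fun q => q.1 == w')).map
              (fun q => (q.2, f q)))).1 == w) = false := by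
            simpa using he
          simp only [Function.comp_apply, hne, Bool.false_eq_true, if_false]
          refine congrArg (fun L : List (String × String) => (w', PySem.Dict.mk (L.map (fun q => (q.2, f q))))) ?_
          rw [List.filter_append, List.filter_cons, List.filter_nil]
          simp [Ne.symm he]
      · have hcon : (pvAsm Q f).contains w = false := by
          rw [PySem.Dict.contains_eq_decide_mem_keys, pv_keys_asm]; exact decide_eq_false hw
        have hfilnil : Q.filter (fun q => q.1 == w) = [] := by
          rw [List.filter_eq_nil_iff]
          intro p hp hbeq
          apply hw
          rw [PySem.Set.mem_ofList]
          exact List.mem_map.mpr ⟨p, hp, beq_iff_eq.mp hbeq⟩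
        rw [PySem.Dict.setdefault_of_not_contains _ _ hcon, PySem.Dict.getD_insert_self]
        apply PySem.Dict.ext
        have hcon1 : ((pvAsm Q f).insert w PySem.Dict.empty).contains w = true :=
          PySem.Dict.contains_insert_self _ _ _
        rw [PySem.Dict.items_insert_of_contains _ _ hcon1,
            PySem.Dict.items_insert_of_not_contains _ _ hcon, hasm,
            PySem.Set.add_of_not_mem hw]
        simp only [pvAsm]
        rw [List.map_append, List.map_append, List.map_singleton, List.map_singleton,
            List.map_map]
        congr 1
        · apply List.map_congr_left
          intro w' hw'
          have he : w' ≠ w := fun h => hw (h ▸ hw')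
          have hne : ((w', PySem.Dict.mk ((Q.filter (fun q => q.1 == w')).map
              (fun q => (q.2, f q)))).1 == w) = false := by
            simpa using he
          simp only [Function.comp_apply, hne, Bool.false_eq_true, if_false]
          refine congrArg (fun L : List (String × String) => (w', PySem.Dict.mk (L.map (fun q => (q.2, f q))))) ?_
          rw [List.filter_append, List.filter_cons, List.filter_nil]
          simp [Ne.symm he]
        · simp only [beq_self_eq_true, if_true]
          refine congrArg (fun I => [(w, I)]) ?_
          apply PySem.Dict.ext
          rw [List.filter_append, hfilnil, List.filter_cons, List.filter_nil]
          simp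
          rfl

lemma pv_foldA (ps : List (String × String)) :
    ps.foldl pvStepA PySem.Dict.empty = pvOuter ps := by
  induction ps using List.reverseRecOn with
  | nil => rfl
  | append_singleton ps p ih =>
      rw [List.foldl_append, ih, List.foldl_cons, List.foldl_nil, pv_stepA_outer]

lemma pv_filtset (ps : List (String × String)) (w : String) :
    (PySem.Set.ofList ps).filter (fun q => q.1 == w) = (pvTags ps w).map (fun t => (w, t)) := by
  induction ps using List.reverseRecOn with
  | nil => rfl
  | append_singleton ps p ih =>
      obtain ⟨a, b⟩ := p
      rw [PySem.Set.ofList_append_singleton]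
      by_cases hab : (a, b) ∈ ps
      · rw [PySem.Set.add_of_mem (by rw [PySem.Set.mem_ofList]; exact hab), ih]
        by_cases haw : a = w
        · subst haw
          rw [pv_tags_step, PySem.Set.add_of_mem ((pv_mem_tags ps a b).mpr hab)]
        · rw [pv_tags_skip ps a b w haw]
      · rw [PySem.Set.add_of_not_mem (fun h => hab (by rwa [PySem.Set.mem_ofList] at h)),
            List.filter_append, List.filter_cons, List.filter_nil]
        by_cases haw : a = w
        · subst haw
          have hb : b ∉ pvTags ps a := fun h => hab ((pv_mem_tags ps a b).mp h)
          rw [pv_tags_step, PySem.Set.add_of_not_mem hb, List.map_append, List.map_singleton, ih]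
          simp
        · rw [ih, pv_tags_skip ps a b w haw]
          simp [haw]

lemma pv_dedupmap (ps : List (String × String)) :
    PySem.Set.ofList ((PySem.Set.ofList ps).map (·.1)) = PySem.Set.ofList (ps.map (·.1)) := by
  induction ps using List.reverseRecOn with
  | nil => rfl
  | append_singleton ps p ih =>
      rw [PySem.Set.ofList_append_singleton, List.map_append, List.map_singleton,
          PySem.Set.ofList_append_singleton, ← ih]
      by_cases hp : p ∈ PySem.Set.ofList ps
      · rw [PySem.Set.add_of_mem hp, PySem.Set.add_of_mem]
        rw [PySem.Set.mem_ofList]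
        exact List.mem_map_of_mem hp
      · rw [PySem.Set.add_of_not_mem hp, List.map_append, List.map_singleton,
            PySem.Set.ofList_append_singleton]

lemma pv_counter_assemble (ps : List (String × String)) :
    (PySem.Dict.counter ps).items.foldl pvStepB PySem.Dict.empty = pvOuter ps := by
  rw [PySem.Dict.items_counter,
      pv_foldB (PySem.Set.ofList ps) (fun q => (ps.count q : Int)) (PySem.Set.nodup_ofList ps)]
  unfold pvAsm pvOuter
  rw [pv_dedupmap]
  refine congrArg PySem.Dict.mk ?_
  apply List.map_congr_left
  intro w _
  refine congrArg (fun L : List (String × Int) => (w, PySem.Dict.mk L)) ?_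
  rw [pv_filtset, List.map_map]
  rfl


-- ===== VERDICT (by name: the statement is the Claim_ definition above) =====
theorem get_tag_dict_spec : Claim_equal_get_tag_dict := by
  intro train _
  show get_tag_dict train = get_tag_dict_alt train
  unfold get_tag_dict get_tag_dict_alt
  have hA : train.foldl
      (fun d sent => sent.foldl pvStepA d)
      (PySem.Dict.empty : PySem.Dict String (PySem.Dict String Int))
      = (train.flatMap (fun s => s)).foldl pvStepA PySem.Dict.empty := by
    rw [show (train.flatMap (fun s => s)) = train.flatten by simp [List.flatMap_id'],
        List.foldl_flatten]
  show ((train.foldl (fun d sent => sent.foldl pvStepA d) PySem.Dict.empty).items.map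
      (fun p => (p.1, p.2.items)))
    = ((PySem.Dict.counter (train.flatMap (fun s => s))).items.foldl pvStepB
        PySem.Dict.empty).items.map (fun p => (p.1, p.2.items))
  rw [hA, pv_foldA, pv_counter_assemble]
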